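-- pv_equiv track=rewrite | github.com/idsia-robotics/Sound-as-Pretext | model_utils.py | _hidden_seq
-- ===== SOURCE A (Python) =====
-- def _closest_log2(x, shift=0):
--     return 1 if x < 2 else (x - 1).bit_length() + shift
--
-- def _hidden_seq(in_size, max_size, min_size=16):
--     compress = in_size > max_size
--     l = max(min_size, 2 ** _closest_log2(in_size, -1 * compress))
--
--     if compress:
--         def get_next(x): return x >> 1
--         def has_finished(x): return x < max_size
--     else:
--         def get_next(x): return x << 1
--         def has_finished(x): return x > max_size
--
--     res = [in_size]
--     while not has_finished(l):
--         res.append(l)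
--         l = get_next(l)
--
--     return res
-- ===== SOURCE B (Python) =====
-- def _hidden_seq(in_size, max_size, min_size=16):
--     if in_size > max_size:
--         # compress: closed-form count of halvings, then one comprehension
--         e = 1 if in_size < 2 else (in_size - 1).bit_length() - 1
--         l = max(min_size, 2 ** e)
--         k = (l // max_size).bit_length()
--         return [in_size] + [l >> i for i in range(k)]
--     else:
--         # expand: closed-form count of doublings
--         e = 1 if in_size < 2 else (in_size - 1).bit_length()
--         l = max(min_size, 2 ** e)
--         k = 0 if l > max_size else (max_size // l).bit_length()
--         return [in_size] + [l << i for i in range(k)]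
-- ===== Notes on version B (the rewrite author's own statement) =====
-- stated objective: alternative
-- what changed: B replaces A's while-loop (repeatedly halving/doubling l and appending) by a closed-form bit_length count of how many halvings/doublings fit before max_size, then builds the tail in one list comprehension.
-- outside the precondition, e.g. on _hidden_seq(10, 0, 16): A does not finish within the time limit, B raises ZeroDivisionError; on _hidden_seq(10, -3, 16): A does not finish within the time limit, B returns [10, 16, 8, 4]
import Mathlib
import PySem

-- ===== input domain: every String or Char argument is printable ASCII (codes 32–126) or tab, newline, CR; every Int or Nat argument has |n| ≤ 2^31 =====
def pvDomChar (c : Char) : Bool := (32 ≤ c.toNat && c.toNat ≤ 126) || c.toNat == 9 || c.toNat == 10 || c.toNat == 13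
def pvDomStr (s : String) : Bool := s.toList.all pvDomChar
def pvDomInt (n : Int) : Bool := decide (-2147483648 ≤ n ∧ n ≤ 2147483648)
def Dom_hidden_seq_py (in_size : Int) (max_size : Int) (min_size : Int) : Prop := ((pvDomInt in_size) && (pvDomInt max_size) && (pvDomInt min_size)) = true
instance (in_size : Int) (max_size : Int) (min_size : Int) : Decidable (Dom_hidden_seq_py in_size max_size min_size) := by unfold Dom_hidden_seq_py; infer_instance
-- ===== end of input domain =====

-- B replaces A's while-loop by a closed-form count of halvings/doublings plus one comprehension (objective: alternative).

-- ===== PORT A =====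
-- the while-loop of _hidden_seq; fuel only makes it total and is chosen large enough to never run out on Pre_
def pyHsLoop (getNext : Int → Int) (hasFinished : Int → Bool) : Nat → Int → List Int → List Int
  | 0, _, res => res
  | fuel + 1, l, res =>
      if hasFinished l then res
      else pyHsLoop getNext hasFinished fuel (getNext l) (res ++ [l])

-- _closest_log2; (x-1).bit_length() is PySem.Int.bitLength (Python-exact)
def closestLog2Py (x : Int) (shift : Int) : Int :=
  if x < 2 then 1 else (PySem.Int.bitLength (x - 1) : Int) + shift

def hidden_seq_py (in_size : Int) (max_size : Int) (min_size : Int) : List Int :=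
  let compress : Bool := decide (in_size > max_size)
  -- Python's 2 ** e: the exponent here is always ≥ 0 (shift is 0 or -1, and -1 only when bit_length ≥ 1), so .toNat is exact
  let l : Int := max min_size (2 ^ (closestLog2Py in_size (-(if compress then 1 else 0))).toNat)
  if compress then
    -- x >> 1 == x // 2 in Python (exact for all ints)
    pyHsLoop (fun x => PySem.Int.floordiv x 2) (fun x => decide (x < max_size)) (l.natAbs + 1) l [in_size]
  else
    -- x << 1 == x * 2
    pyHsLoop (fun x => x * 2) (fun x => decide (x > max_size)) ((max_size + 1 - l).toNat + 1) l [in_size]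

-- ===== PORT B =====
def hidden_seq_py_alt (in_size : Int) (max_size : Int) (min_size : Int) : List Int :=
  if in_size > max_size then
    let e : Nat := if in_size < 2 then 1 else PySem.Int.bitLength (in_size - 1) - 1
    let l : Int := max min_size (2 ^ e)
    let k : Nat := PySem.Int.bitLength (PySem.Int.floordiv l max_size)
    -- l >> i == l // 2**i in Python (exact for all ints)
    in_size :: (List.range k).map (fun i => PySem.Int.floordiv l (2 ^ i))
  else
    let e : Nat := if in_size < 2 then 1 else PySem.Int.bitLength (in_size - 1)
    let l : Int := max min_size (2 ^ e)
    let k : Nat := if l > max_size then 0 else PySem.Int.bitLength (PySem.Int.floordiv max_size l)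
    -- l << i == l * 2**i
    in_size :: (List.range k).map (fun i => l * 2 ^ i)

-- ===== PRECONDITION & SPEC =====
-- Pre_ excludes only the inputs on which A never returns: when compressing (in_size > max_size)
-- toward a max_size ≤ 0, A's while-loop halves l down to 0 and then loops forever.
def Pre_hidden_seq_py (in_size : Int) (max_size : Int) (min_size : Int) : Prop :=
  in_size ≤ max_size ∨ 1 ≤ max_size

instance (in_size : Int) (max_size : Int) (min_size : Int) : Decidable (Pre_hidden_seq_py in_size max_size min_size) := by
  unfold Pre_hidden_seq_py; infer_instance

def pvWitness_hidden_seq_py : Int × Int × Int := (100, 10, 4)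

def Spec_hidden_seq_py (in_size : Int) (max_size : Int) (min_size : Int) (out : List Int) : Prop := out = hidden_seq_py_alt in_size max_size min_size
instance (in_size : Int) (max_size : Int) (min_size : Int) (out : List Int) : Decidable (Spec_hidden_seq_py in_size max_size min_size out) := by unfold Spec_hidden_seq_py; infer_instance

-- ===== CLAIM (what is proved, stated in full; the proofs are below) =====
def Claim_equal_hidden_seq_py : Prop := ∀ (in_size : Int) (max_size : Int) (min_size : Int), Dom_hidden_seq_py in_size max_size min_size → Pre_hidden_seq_py in_size max_size min_size → Spec_hidden_seq_py in_size max_size min_size (hidden_seq_py in_size max_size min_size)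

-- ===== LEMMAS AND PROOFS =====

lemma bitLength_pos_of_pos {x : Int} (hx : 0 < x) : 1 ≤ PySem.Int.bitLength x := by
  rw [PySem.Int.bitLength_of_pos hx]; omega

-- compress loop = comprehension over a closed-form count of halvings
lemma hs_down (m : Nat) (hm : 1 ≤ m) :
    ∀ (fuel n : Nat) (acc : List Int), n < fuel →
      pyHsLoop (fun x => PySem.Int.floordiv x 2) (fun x => decide (x < (m : Int))) fuel (n : Int) acc
        = acc ++ (List.range (PySem.Int.bitLength ((n / m : Nat) : Int))).map
            (fun i => ((n / 2 ^ i : Nat) : Int)) := by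
  intro fuel
  induction fuel with
  | zero => intro n acc h; omega
  | succ fuel ih =>
    intro n acc h
    by_cases hn : n < m
    · have hdm : n / m = 0 := Nat.div_eq_of_lt hn
      simp [pyHsLoop, hn, hdm, PySem.Int.bitLength_zero]
    · replace hn : m ≤ n := by omega
      have h1 : 1 ≤ n := le_trans hm hn
      have hstep : PySem.Int.floordiv (n : Int) 2 = ((n / 2 : Nat) : Int) := by
        exact_mod_cast PySem.Int.floordiv_natCast n 2
      have hfin : (decide ((n : Int) < (m : Int))) = false := by
        simp; exact_mod_cast hn
      have hlt : n / 2 < fuel := lt_of_lt_of_le (Nat.div_lt_self (by omega) (by omega)) (by omega)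
      have := ih (n / 2) (acc ++ [(n : Int)]) hlt
      simp only [pyHsLoop, hfin, Bool.false_eq_true, if_false, hstep, this]
      have hdd : n / 2 / m = n / m / 2 := by
        rw [Nat.div_div_eq_div_mul, Nat.div_div_eq_div_mul, Nat.mul_comm]
      have hq : 0 < n / m := (Nat.one_le_div_iff (by omega)).mpr hn
      have hbl : PySem.Int.bitLength ((n / m : Nat) : Int)
          = PySem.Int.bitLength ((n / m / 2 : Nat) : Int) + 1 :=
        PySem.Int.bitLength_natCast hq
      rw [hbl, ← hdd, List.range_succ_eq_map, List.map_cons, List.map_map]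
      have hfun : ((fun i => ((n / 2 ^ i : Nat) : Int)) ∘ Nat.succ)
          = (fun i => ((n / 2 / 2 ^ i : Nat) : Int)) := by
        funext i
        simp only [Function.comp]
        congr 1
        rw [Nat.div_div_eq_div_mul, pow_succ']
      rw [hfun]
      simp

-- expand loop = comprehension over a closed-form count of doublings
lemma hs_up (m : Int) :
    ∀ (fuel : Nat) (n : Nat) (acc : List Int), 1 ≤ n → (m + 1 - n).toNat < fuel →
      pyHsLoop (fun x => x * 2) (fun x => decide (x > m)) fuel (n : Int) acc
        = acc ++ (List.range (if (n : Int) > m then 0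
              else PySem.Int.bitLength ((m.toNat / n : Nat) : Int))).map
            (fun i => ((n * 2 ^ i : Nat) : Int)) := by
  intro fuel
  induction fuel with
  | zero => intro n acc hn h; omega
  | succ fuel ih =>
    intro n acc hn h
    by_cases hgt : (n : Int) > m
    · simp [pyHsLoop, hgt]
    · replace hgt : (n : Int) ≤ m := by omega
      have hM : n ≤ m.toNat := by omega
      have hstep : ((n : Int) * 2) = ((n * 2 : Nat) : Int) := by push_cast; ring
      have hfin : (decide ((n : Int) > m)) = false := by simp; omega
      have hlt : (m + 1 - ((n * 2 : Nat) : Int)).toNat < fuel := by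
        have : (1 : Int) ≤ (n : Int) := by exact_mod_cast hn
        omega
      have := ih (n * 2) (acc ++ [(n : Int)]) (by omega) hlt
      simp only [pyHsLoop, hfin, Bool.false_eq_true, if_false, hstep, this]
      by_cases h2 : ((n * 2 : Nat) : Int) > m
      · -- last doubling: n ≤ m < 2n, so m.toNat / n = 1 and exactly one element remains
        have hdiv : m.toNat / n = 1 :=
          Nat.div_eq_of_lt_le (by omega) (by push_cast at h2; omega)
        have hb1 : PySem.Int.bitLength ((1 : Nat) : Int) = 1 := by decide
        simp only [h2, if_true, hgt.not_gt, if_false, hdiv, hb1, List.range_one,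
          List.map_cons, List.map_nil, List.range_zero, pow_zero, Nat.mul_one]
        simp
      · replace h2 : n * 2 ≤ m.toNat := by push_cast at h2; omega
        have hdd : m.toNat / (n * 2) = m.toNat / n / 2 := by
          rw [Nat.div_div_eq_div_mul]
        have hq : 0 < m.toNat / n := (Nat.one_le_div_iff (by omega)).mpr hM
        have hbl : PySem.Int.bitLength ((m.toNat / n : Nat) : Int)
            = PySem.Int.bitLength ((m.toNat / n / 2 : Nat) : Int) + 1 :=
          PySem.Int.bitLength_natCast hq
        have h2' : ¬ (((n * 2 : Nat) : Int) > m) := by push_cast; omega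
        simp only [hgt.not_gt, if_false, h2']
        rw [hbl, ← hdd]
        rw [List.range_succ_eq_map, List.map_cons, List.map_map]
        have hfun : ((fun i => ((n * 2 ^ i : Nat) : Int)) ∘ Nat.succ)
            = (fun i => ((n * 2 * 2 ^ i : Nat) : Int)) := by
          funext i
          simp only [Function.comp]
          congr 1
          rw [pow_succ']; ring
        rw [hfun]
        simp

-- ===== VERDICT (by name: the statement is the Claim_ definition above) =====
lemma floordiv_natCast' (a b : Nat) : PySem.Int.floordiv (a : Int) (b : Int) = ((a / b : Nat) : Int) := by
  exact_mod_cast PySem.Int.floordiv_natCast a b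

lemma floordiv_pow_two (n : Nat) (i : Nat) :
    PySem.Int.floordiv (n : Int) ((2 : Int) ^ i) = ((n / 2 ^ i : Nat) : Int) := by
  have h : ((2 : Int) ^ i) = ((2 ^ i : Nat) : Int) := by push_cast; ring
  rw [h, floordiv_natCast']

theorem hidden_seq_py_spec : Claim_equal_hidden_seq_py := by
  intro in_size max_size min_size _ hpre
  unfold Spec_hidden_seq_py hidden_seq_py hidden_seq_py_alt
  by_cases hc : in_size > max_size
  · -- compress branch
    have hm : 1 ≤ max_size := by
      unfold Pre_hidden_seq_py at hpre; omega
    simp only [hc, decide_true, if_true]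
    have hexp : (closestLog2Py in_size (-(1 : Int))).toNat
        = (if in_size < 2 then 1 else PySem.Int.bitLength (in_size - 1) - 1) := by
      unfold closestLog2Py
      by_cases h2 : in_size < 2
      · simp [h2]
      · have hb : 1 ≤ PySem.Int.bitLength (in_size - 1) := bitLength_pos_of_pos (by omega)
        simp only [h2, if_false]
        omega
    rw [hexp]
    set e : Nat := (if in_size < 2 then 1 else PySem.Int.bitLength (in_size - 1) - 1) with he
    set l : Int := max min_size (2 ^ e) with hldef
    have hlpos : 1 ≤ l := le_trans (one_le_pow₀ (by norm_num)) (le_max_right min_size ((2 : Int) ^ e))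
    have hl : l = ((l.toNat : Nat) : Int) := by omega
    have hmm : max_size = ((max_size.toNat : Nat) : Int) := by omega
    rw [hl, hmm, Int.natAbs_natCast]
    rw [hs_down max_size.toNat (by omega) (l.toNat + 1) l.toNat [in_size] (Nat.lt_succ_self _)]
    rw [floordiv_natCast', List.singleton_append]
    congr 1
    apply List.map_congr_left
    intro i _
    rw [floordiv_pow_two]
  · -- expand branch
    simp only [hc, decide_false, Bool.false_eq_true, if_false, neg_zero]
    have hexp : (closestLog2Py in_size 0).toNat
        = (if in_size < 2 then 1 else PySem.Int.bitLength (in_size - 1)) := by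
      unfold closestLog2Py
      by_cases h2 : in_size < 2
      · simp [h2]
      · simp only [h2, if_false]
        omega
    rw [hexp]
    set e : Nat := (if in_size < 2 then 1 else PySem.Int.bitLength (in_size - 1)) with he
    set l : Int := max min_size (2 ^ e) with hldef
    have hlpos : 1 ≤ l := le_trans (one_le_pow₀ (by norm_num)) (le_max_right min_size ((2 : Int) ^ e))
    have hl : l = ((l.toNat : Nat) : Int) := by omega
    have hn : 1 ≤ l.toNat := by omega
    rw [hl]
    rw [hs_up max_size ((max_size + 1 - ((l.toNat : Nat) : Int)).toNat + 1) l.toNat [in_size] hn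
      (Nat.lt_succ_self _)]
    rw [List.singleton_append]
    have hk : (if ((l.toNat : Nat) : Int) > max_size then (0 : Nat)
          else PySem.Int.bitLength ((max_size.toNat / l.toNat : Nat) : Int))
        = (if ((l.toNat : Nat) : Int) > max_size then (0 : Nat)
          else PySem.Int.bitLength (PySem.Int.floordiv max_size ((l.toNat : Nat) : Int))) := by
      by_cases hgt : ((l.toNat : Nat) : Int) > max_size
      · rw [if_pos hgt, if_pos hgt]
      · have hmm : max_size = ((max_size.toNat : Nat) : Int) := by omega
        simp only [hgt, if_false]
        conv_rhs => rw [hmm]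
        rw [floordiv_natCast']
    rw [hk]
    congr 1
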